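-- pv_equiv track=rewrite | github.com/kipoha/exs-shell | exs_shell/ui/modules/center_tab/childs/metrics.py | _calc_cols
-- ===== SOURCE A (Python) =====
-- import math
--
-- H = 300
--
-- W = 700
--
-- PADDING = 6
--
-- MAIN_GRAPH_H = 90
--
-- STAT_H = 24
--
-- def _calc_cols(n: int) -> int:
--     available_h = H - MAIN_GRAPH_H - STAT_H - PADDING * 4
--     best = 1
--     for cols in range(1, n + 1):
--         rows = math.ceil(n / cols)
--         if W // cols - PADDING >= 60 and available_h // rows - PADDING >= 30:
--             best = cols
--     return best
-- ===== SOURCE B (Python) =====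
-- def _calc_cols(n: int) -> int:
--     # Closed form: width constraint (700//cols - 6 >= 60) caps cols at 10;
--     # height constraint (162//rows - 6 >= 30) means rows = ceil(n/cols) <= 4.
--     # The condition is easiest to satisfy at the largest candidate, min(n, 10).
--     cols = min(n, 10)
--     if cols >= 1 and (n + cols - 1) // cols <= 4:
--         return cols
--     return 1
-- ===== Notes on version B (the rewrite author's own statement) =====
-- stated objective: faster
-- what changed: Replaces the O(n) scan over all candidate column counts by an O(1) closed form: the largest feasible candidate is min(n,10) and it wins exactly when ceil(n/min(n,10)) <= 4.
import Mathlib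
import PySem

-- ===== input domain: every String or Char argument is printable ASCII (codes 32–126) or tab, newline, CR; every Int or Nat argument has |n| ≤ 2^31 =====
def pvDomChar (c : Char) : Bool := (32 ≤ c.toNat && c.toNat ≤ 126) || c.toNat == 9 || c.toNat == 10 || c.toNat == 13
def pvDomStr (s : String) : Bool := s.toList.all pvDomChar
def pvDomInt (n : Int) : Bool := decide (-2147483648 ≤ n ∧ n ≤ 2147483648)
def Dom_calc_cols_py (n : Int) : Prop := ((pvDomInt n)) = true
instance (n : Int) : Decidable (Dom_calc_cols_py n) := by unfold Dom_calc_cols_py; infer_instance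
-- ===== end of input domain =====

-- B replaces A's linear scan over candidate column counts by an O(1) closed form (faster, asymptotic).


-- ===== PORT A =====
-- math.ceil(n / cols) is ported as -((-n) // cols), which is exact here: on the
-- domain |n| ≤ 2^31 the float quotient never rounds across an integer.
def calc_cols_py (n : Int) : Int :=
  let available_h : Int := 300 - 90 - 24 - 6 * 4
  (PySem.List.pyRange 1 (n + 1) 1).foldl
    (fun best cols =>
      let rows : Int := -(PySem.Int.floordiv (-n) cols)
      if PySem.Int.floordiv 700 cols - 6 ≥ 60 ∧
         PySem.Int.floordiv available_h rows - 6 ≥ 30 then cols else best)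
    1

-- ===== PORT B =====
def calc_cols_py_alt (n : Int) : Int :=
  let cols : Int := min n 10
  if cols ≥ 1 ∧ PySem.Int.floordiv (n + cols - 1) cols ≤ 4 then cols else 1

-- ===== PRECONDITION & SPEC =====
def Spec_calc_cols_py (n : Int) (out : Int) : Prop := out = calc_cols_py_alt n
instance (n : Int) (out : Int) : Decidable (Spec_calc_cols_py n out) := by unfold Spec_calc_cols_py; infer_instance

-- ===== CLAIM (what is proved, stated in full; the proofs are below) =====
def Claim_equal_calc_cols_py : Prop := ∀ (n : Int), Dom_calc_cols_py n → Spec_calc_cols_py n (calc_cols_py n)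

-- ===== LEMMAS AND PROOFS =====

-- a foldl whose step never changes the state returns its initial value
theorem foldl_fix {α β : Type} (l : List β) (f : α → β → α) (init : α)
    (h : ∀ b x, x ∈ l → f b x = b) : l.foldl f init = init := by
  induction l generalizing init with
  | nil => rfl
  | cons y t ih =>
      simp only [List.foldl_cons, h init y (by simp)]
      exact ih init (fun b x hx => h b x (by simp [hx]))

-- for n ≥ 41 the loop body of A never fires
theorem step_id_of_big (n : Int) (hn : 41 ≤ n) (b x : Int)
    (hx : x ∈ PySem.List.pyRange 1 (n + 1) 1) :
    (fun best cols =>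
      let rows : Int := -(PySem.Int.floordiv (-n) cols)
      if PySem.Int.floordiv 700 cols - 6 ≥ 60 ∧
         PySem.Int.floordiv (300 - 90 - 24 - 6 * 4 : Int) rows - 6 ≥ 30 then cols else best) b x
      = b := by
  have hm := (PySem.List.mem_pyRange_one (x := x) (a := 1) (b := n + 1)).mp hx
  have hx1 : (1 : Int) ≤ x := hm.1
  simp only []
  rw [if_neg]
  rintro ⟨h700, h162⟩
  by_cases hx10 : x ≤ 10
  · -- cols small ⇒ rows ≥ 5 ⇒ height test fails
    have hr5 : PySem.Int.floordiv (-n) x < -4 := by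
      rw [PySem.Int.floordiv_lt_iff_lt_mul (show (0:Int) < x by omega)]; nlinarith
    have h36 : (36 : Int) ≤ PySem.Int.floordiv 162 (-(PySem.Int.floordiv (-n) x)) := by
      norm_num at h162; omega
    rw [PySem.Int.le_floordiv_iff_mul_le (show (0:Int) < -(PySem.Int.floordiv (-n) x) by omega)] at h36
    nlinarith
  · -- cols ≥ 11 ⇒ width test fails
    have h66 : (66 : Int) ≤ PySem.Int.floordiv 700 x := by omega
    rw [PySem.Int.le_floordiv_iff_mul_le (show (0:Int) < x by omega)] at h66
    nlinarith

-- ===== VERDICT (by name: the statement is the Claim_ definition above) =====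
theorem calc_cols_py_spec : Claim_equal_calc_cols_py := by
  intro n _
  unfold Spec_calc_cols_py
  rcases (by omega : n ≤ 0 ∨ 0 < n) with h0 | h0
  · -- empty range; B's guard cols ≥ 1 fails
    unfold calc_cols_py calc_cols_py_alt
    rw [PySem.List.pyRange_one_eq_nil (by omega)]
    have hmin : min n 10 = n := by omega
    simp only [List.foldl_nil, hmin]
    rw [if_neg (by omega)]
  · rcases (by omega : n ≤ 40 ∨ 40 < n) with h40 | h40
    · interval_cases n <;> decide
    · -- n ≥ 41: A's loop never updates best; B's height guard fails at cols = 10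
      unfold calc_cols_py calc_cols_py_alt
      have hmin : min n 10 = 10 := by omega
      rw [foldl_fix _ _ _ (step_id_of_big n (by omega))]
      have h10 : PySem.Int.floordiv (n + min n 10 - 1) (min n 10) = (n + 9) / 10 := by
        rw [hmin, PySem.Int.floordiv_eq_ediv_of_pos (show (0:Int) < 10 by omega)]; omega
      rw [if_neg]
      rintro ⟨-, hle⟩
      rw [h10] at hle
      omega
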